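-- pv_equiv track=rewrite | github.com/limkyouyou/12_python_projects | tic_tac_toe/player.py | filter_single
-- ===== SOURCE A (Python) =====
-- from collections import Counter
--
-- def filter_single(filtered_list, marker):
--     res = []
--     single_list = list(filter(lambda item:item.count(marker) == 1, filtered_list))
--     if single_list:
--         flat_single = [x for y in single_list for x in y if x != marker]
--         flat_single.sort(key=Counter(flat_single).get, reverse=True)
--         for item in flat_single:
--             if item not in res: res.append(item)
--     return res
-- ===== SOURCE B (Python) =====
-- from collections import Counter
--
-- def filter_single(filtered_list, marker):
--     flat = [x for line in filtered_list if line.count(marker) == 1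
--               for x in line if x != marker]
--     return [item for item, _ in Counter(flat).most_common()]
-- ===== Notes on version B (the rewrite author's own statement) =====
-- stated objective: simpler
-- what changed: Instead of sorting the whole duplicate-laden flat list by count and deduplicating with a quadratic 'item not in res' loop, B counts once and emits each distinct cell exactly once via Counter(flat).most_common(), whose count-descending, first-appearance tie-break order matches A's stable sort-then-dedup.
import Mathlib
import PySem

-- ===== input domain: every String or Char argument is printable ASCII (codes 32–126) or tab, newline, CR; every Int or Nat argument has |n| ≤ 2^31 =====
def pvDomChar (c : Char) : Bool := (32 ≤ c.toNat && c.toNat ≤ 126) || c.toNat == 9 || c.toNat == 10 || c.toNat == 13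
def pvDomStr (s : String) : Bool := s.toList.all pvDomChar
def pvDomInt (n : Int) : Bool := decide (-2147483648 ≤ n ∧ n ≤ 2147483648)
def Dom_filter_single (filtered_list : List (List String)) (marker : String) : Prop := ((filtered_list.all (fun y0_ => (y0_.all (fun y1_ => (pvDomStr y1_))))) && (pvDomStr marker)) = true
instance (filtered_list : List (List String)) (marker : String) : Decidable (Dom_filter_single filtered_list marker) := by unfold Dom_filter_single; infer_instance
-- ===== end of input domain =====

-- B replaces A's sort-over-duplicates plus quadratic 'not in res' dedup with a single
-- Counter(flat).most_common() emission (objective: simpler); return values proved equal.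

-- ===== PORT A =====
def filter_single (filtered_list : List (List String)) (marker : String) : List String :=
  let res : List String := []
  let single_list : List (List String) :=
    filtered_list.filter (fun item => item.count marker == 1)
  if single_list.isEmpty then res
  else
    let flat_single : List String :=
      single_list.flatMap (fun y => y.filter (fun x => x != marker))
    -- key=Counter(flat_single).get: every element being sorted is a key of the Counter,
    -- so Python's .get returns its count there; ported exactly as getD _ 0.
    let flat_sorted : List String :=
      PySem.List.sorted flat_single
        (fun x => (PySem.Dict.counter flat_single).getD x 0) true
    flat_sorted.foldl (fun res item => if item ∈ res then res else res ++ [item]) res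

-- ===== PORT B =====
def filter_single_alt (filtered_list : List (List String)) (marker : String) : List String :=
  let flat : List String := filtered_list.flatMap (fun line =>
    if line.count marker == 1 then line.filter (fun x => x != marker) else [])
  -- Counter.most_common() is sorted(items, key=itemgetter(1), reverse=True) (CPython, stable)
  ((PySem.List.sorted (PySem.Dict.counter flat).items (fun p => p.2) true).map (fun p => p.1))

-- ===== PRECONDITION & SPEC =====
def Spec_filter_single (filtered_list : List (List String)) (marker : String) (out : List String) : Prop := out = filter_single_alt filtered_list marker
instance (filtered_list : List (List String)) (marker : String) (out : List String) : Decidable (Spec_filter_single filtered_list marker out) := by unfold Spec_filter_single; infer_instance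

-- ===== CLAIM (what is proved, stated in full; the proofs are below) =====
def Claim_equal_filter_single : Prop := ∀ (filtered_list : List (List String)) (marker : String), Dom_filter_single filtered_list marker → Spec_filter_single filtered_list marker (filter_single filtered_list marker)

-- ===== LEMMAS AND PROOFS =====

-- insertBy puts x at the first position whose element e has bf x e
theorem insertBy_take_drop (bf : String → String → Bool) (x : String) (S : List String) :
    PySem.List.insertBy bf x S
      = S.takeWhile (fun y => !bf x y) ++ x :: S.dropWhile (fun y => !bf x y) := by
  induction S with
  | nil => simp [PySem.List.insertBy]
  | cons y ys ih =>
      by_cases h : bf x y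
      · simp [PySem.List.insertBy, h]
      · simp only [Bool.not_eq_true] at h
        simp [PySem.List.insertBy, h, ih]

-- inserting behind a prefix that refuses x, in front of a tail that accepts it
theorem insertBy_append (bf : String → String → Bool) (x : String) (A R : List String)
    (h1 : ∀ y ∈ A, bf x y = false) (h2 : ∀ z ∈ R, bf x z = true) :
    PySem.List.insertBy bf x (A ++ R) = A ++ x :: R := by
  induction A with
  | nil =>
      cases R with
      | nil => simp [PySem.List.insertBy]
      | cons z R' => simp [PySem.List.insertBy, h2 z (by simp)]
  | cons a A' ih =>
      simp only [List.cons_append]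
      have ha := h1 a (by simp)
      simp [PySem.List.insertBy, ha, ih (fun y hy => h1 y (by simp [hy]))]

theorem dropWhile_head_false (p : String → Bool) (S : List String) (q : String)
    (Q' : List String) (h : S.dropWhile p = q :: Q') : p q = false := by
  induction S with
  | nil => simp at h
  | cons y ys ih =>
      by_cases hy : p y
      · rw [List.dropWhile_cons_of_pos hy] at h; exact ih h
      · rw [List.dropWhile_cons_of_neg hy] at h
        cases h; simpa using hy

-- in a rev-sorted list, everything after x's insertion point has key < key x
theorem drop_lt (c : String → Int) (x : String) (S : List String)
    (hp : S.Pairwise (fun a b => c b ≤ c a)) :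
    ∀ z ∈ S.dropWhile (fun y => !(decide (c y < c x))), c z < c x := by
  cases hQ : S.dropWhile (fun y => !(decide (c y < c x))) with
  | nil => simp
  | cons q Q' =>
      have hq := dropWhile_head_false _ _ _ _ hQ
      have hqlt : c q < c x := by simpa using hq
      have hQp : (q :: Q').Pairwise (fun a b => c b ≤ c a) :=
        hQ ▸ hp.sublist (List.dropWhile_sublist _)
      intro z hz
      rcases List.mem_cons.mp hz with rfl | hz'
      · exact hqlt
      · exact lt_of_le_of_lt ((List.pairwise_cons.mp hQp).1 z hz') hqlt

-- inserting a duplicate into a rev-sorted list does not change its dedup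
theorem ofList_insertBy_mem (c : String → Int) (x : String) (S : List String)
    (hp : S.Pairwise (fun a b => c b ≤ c a)) (hx : x ∈ S) :
    PySem.Set.ofList (PySem.List.insertBy (fun a b => decide (c b < c a)) x S)
      = PySem.Set.ofList S := by
  have hbf : (fun y => !(fun a b => decide (c b < c a)) x y) = (fun y => !(decide (c y < c x))) := rfl
  rw [insertBy_take_drop, hbf]
  set P := S.takeWhile (fun y => !(decide (c y < c x))) with hP
  set Q := S.dropWhile (fun y => !(decide (c y < c x))) with hQ
  have hSP : P ++ Q = S := List.takeWhile_append_dropWhile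
  have hxP : x ∈ P := by
    rcases List.mem_append.mp (hSP ▸ hx) with h | h
    · exact h
    · exact absurd (drop_lt c x S hp x h) (lt_irrefl _)
  rw [PySem.Set.ofList_append, PySem.Set.update_cons,
      PySem.Set.add_of_mem (by simpa [PySem.Set.mem_ofList] using hxP),
      ← PySem.Set.ofList_append, hSP]

-- inserting a fresh element into a rev-sorted list commutes with dedup
theorem ofList_insertBy_not_mem (c : String → Int) (x : String) (S : List String)
    (hp : S.Pairwise (fun a b => c b ≤ c a)) (hx : x ∉ S) :
    PySem.Set.ofList (PySem.List.insertBy (fun a b => decide (c b < c a)) x S)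
      = PySem.List.insertBy (fun a b => decide (c b < c a)) x (PySem.Set.ofList S) := by
  have hbf : (fun y => !(fun a b => decide (c b < c a)) x y) = (fun y => !(decide (c y < c x))) := rfl
  rw [insertBy_take_drop, hbf]
  set P := S.takeWhile (fun y => !(decide (c y < c x))) with hP
  set Q := S.dropWhile (fun y => !(decide (c y < c x))) with hQ
  have hSP : P ++ Q = S := List.takeWhile_append_dropWhile
  have hxP : x ∉ P := fun h => hx (hSP ▸ List.mem_append.mpr (Or.inl h))
  have hxQ : x ∉ Q := fun h => hx (hSP ▸ List.mem_append.mpr (Or.inr h))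
  have lhs : PySem.Set.ofList (P ++ x :: Q)
      = (PySem.Set.ofList P ++ [x])
        ++ (PySem.Set.ofList Q).filter (fun y => !((PySem.Set.ofList P).contains y)) := by
    rw [PySem.Set.ofList_append, PySem.Set.update_cons,
        PySem.Set.add_of_not_mem (by simpa [PySem.Set.mem_ofList] using hxP),
        PySem.Set.update_eq_append_filter]
    congr 1
    apply List.filter_congr
    intro y hy
    have hyQ : y ∈ Q := (PySem.Set.mem_ofList _ _).mp hy
    have hyx : ¬ (y = x) := fun h => hxQ (h ▸ hyQ)
    simp [PySem.Set.contains, hyx]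
  have hofS : PySem.Set.ofList S
      = PySem.Set.ofList P ++ (PySem.Set.ofList Q).filter (fun y => !((PySem.Set.ofList P).contains y)) := by
    rw [← hSP, PySem.Set.ofList_append, PySem.Set.update_eq_append_filter]
  rw [lhs, hofS, insertBy_append]
  · simp
  · intro y hy
    have hyP : y ∈ P := (PySem.Set.mem_ofList _ _).mp hy
    have := List.mem_takeWhile_imp (hP ▸ hyP)
    simpa using this
  · intro z hz
    have hzQ : z ∈ Q := (PySem.Set.mem_ofList _ _).mp (List.mem_of_mem_filter hz)
    simpa using drop_lt c x S hp z hzQ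

theorem sorted_append_singleton (c : String → Int) (xs : List String) (x : String) :
    PySem.List.sorted (xs ++ [x]) c true
      = PySem.List.insertBy (fun a b => decide (c b < c a)) x (PySem.List.sorted xs c true) := by
  rw [PySem.List.sorted_rev_eq_foldl_insertBy, PySem.List.sorted_rev_eq_foldl_insertBy,
      List.foldl_append]
  rfl

-- ordered dedup commutes with the stable reverse sort (the heart of the equivalence)
theorem ofList_sorted_rev (c : String → Int) (xs : List String) :
    PySem.Set.ofList (PySem.List.sorted xs c true)
      = PySem.List.sorted (PySem.Set.ofList xs) c true := by
  induction xs using List.reverseRecOn with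
  | nil => rfl
  | append_singleton xs x ih =>
      rw [sorted_append_singleton]
      by_cases hx : x ∈ xs
      · rw [ofList_insertBy_mem c x _ (PySem.List.sorted_pairwise_rev xs c) ((PySem.List.mem_sorted xs c true x).mpr hx),
            ih, PySem.Set.ofList_append_singleton,
            PySem.Set.add_of_mem ((PySem.Set.mem_ofList _ _).mpr hx)]
      · rw [ofList_insertBy_not_mem c x _ (PySem.List.sorted_pairwise_rev xs c)
              (fun h => hx ((PySem.List.mem_sorted xs c true x).mp h)),
            ih, PySem.Set.ofList_append_singleton,
            PySem.Set.add_of_not_mem (fun h => hx ((PySem.Set.mem_ofList _ _).mp h)),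
            sorted_append_singleton]

-- stable sort of the Counter's (key, count) pairs by count = sort of the keys by count, mapped
theorem insertBy_map (c : String → Int) (x : String) (ys : List String) :
    PySem.List.insertBy (fun p q => decide (q.2 < p.2)) (x, c x)
        (ys.map (fun k => (k, c k)))
      = (PySem.List.insertBy (fun a b => decide (c b < c a)) x ys).map (fun k => (k, c k)) := by
  induction ys with
  | nil => simp [PySem.List.insertBy]
  | cons y ys ih =>
      by_cases h : c y < c x
      · simp [PySem.List.insertBy, h]
      · simp [PySem.List.insertBy, h, ih]

theorem sorted_pairs (xs : List String) (c : String → Int) :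
    PySem.List.sorted (xs.map (fun k => (k, c k))) (fun p => p.2) true
      = (PySem.List.sorted xs c true).map (fun k => (k, c k)) := by
  rw [PySem.List.sorted_rev_eq_foldl_insertBy, PySem.List.sorted_rev_eq_foldl_insertBy]
  have main : ∀ (xs : List String) (acc : List String),
      (xs.map (fun k => (k, c k))).foldl
          (fun a p => PySem.List.insertBy (fun p q => decide ((fun r => r.2) q < (fun r => r.2) p)) p a)
          (acc.map (fun k => (k, c k)))
        = (xs.foldl (fun a k => PySem.List.insertBy (fun a b => decide (c b < c a)) k a) acc).map
            (fun k => (k, c k)) := by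
    intro xs
    induction xs with
    | nil => intro acc; rfl
    | cons x xs ih =>
        intro acc
        simp only [List.map_cons, List.foldl_cons]
        rw [insertBy_map c x acc, ih]
  exact main xs []

-- A's flattening of the filtered rows = B's guarded flatMap
theorem flat_eq (filtered_list : List (List String)) (marker : String) :
    (filtered_list.filter (fun item => item.count marker == 1)).flatMap
        (fun y => y.filter (fun x => x != marker))
      = filtered_list.flatMap (fun line =>
          if line.count marker == 1 then line.filter (fun x => x != marker) else []) := by
  induction filtered_list with
  | nil => rfl
  | cons l ls ih =>
      cases h : (l.count marker == 1 : Bool) with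
      | true =>
          simp only [List.filter_cons, h, if_true, List.flatMap_cons, ih]
      | false =>
          simp only [List.filter_cons, h, Bool.false_eq_true, if_false, List.flatMap_cons, ih,
            List.nil_append]

-- A's 'if item not in res: res.append(item)' loop is ordered dedup
theorem foldl_dedup (L : List String) :
    L.foldl (fun res item => if item ∈ res then res else res ++ [item]) []
      = PySem.Set.ofList L := by
  rw [PySem.Set.ofList_eq_foldl]
  apply PySem.List.foldl_congr_mem
  intro acc x _
  rw [PySem.Set.add_eq_ite]

-- Counter(flat).get v = flat.count v
theorem key_eq (flat : List String) :
    (fun x => (PySem.Dict.counter flat).getD x 0) = (fun x => (flat.count x : Int)) := by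
  funext x; exact PySem.Dict.getD_counter flat x

theorem filter_single_eq (fl : List (List String)) (m : String) :
    filter_single fl m = filter_single_alt fl m := by
  unfold filter_single filter_single_alt
  simp only []
  rw [PySem.Dict.items_counter, sorted_pairs, List.map_map]
  have hmapid : ((fun p => p.1) ∘ fun k => (k, ((fl.flatMap (fun line =>
      if line.count m == 1 then line.filter (fun x => x != m) else [])).count k : Int)))
      = id := rfl
  rw [hmapid, List.map_id]
  by_cases h : (fl.filter (fun item => item.count m == 1)).isEmpty
  · rw [if_pos h]
    have hnil : fl.flatMap (fun line =>
        if line.count m == 1 then line.filter (fun x => x != m) else []) = [] := by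
      rw [← flat_eq, List.isEmpty_iff.mp h]
      rfl
    rw [hnil]
    rfl
  · rw [if_neg h, foldl_dedup, key_eq, ofList_sorted_rev, flat_eq]

-- ===== VERDICT (by name: the statement is the Claim_ definition above) =====
theorem filter_single_spec : Claim_equal_filter_single := by
  intro fl m _
  exact filter_single_eq fl m
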